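-- pv_equiv track=rewrite | github.com/zahiessam/anki-semantic-search | utils/search_research_log.py | rank_deltas
-- ===== SOURCE A (Python) =====
-- def rank_deltas(before, after, final=None):
--     def ranks(rows):
--         out = {}
--         for row in rows or []:
--             note_id = row.get("note_id")
--             if note_id is not None:
--                 out[note_id] = row.get("rank")
--         return out
--
--     before_ranks = ranks(before)
--     after_ranks = ranks(after)
--     final_ranks = ranks(final)
--     note_ids = sorted(set(before_ranks) | set(after_ranks) | set(final_ranks))
--     return [
--         {
--             "note_id": note_id,
--             "pre_rank": before_ranks.get(note_id),
--             "post_rerank_rank": after_ranks.get(note_id),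
--             "final_rank": final_ranks.get(note_id),
--         }
--         for note_id in note_ids
--     ]
-- ===== SOURCE B (Python) =====
-- def rank_deltas(before, after, final=None):
--     def last_rank(rows, note_id):
--         for row in reversed(rows or []):
--             if row.get("note_id") == note_id:
--                 return row.get("rank")
--         return None
--
--     ids = {row.get("note_id")
--            for rows in (before, after, final)
--            for row in rows or []
--            if row.get("note_id") is not None}
--     return [
--         {
--             "note_id": i,
--             "pre_rank": last_rank(before, i),
--             "post_rerank_rank": last_rank(after, i),
--             "final_rank": last_rank(final, i),
--         }
--         for i in sorted(ids)
--     ]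
-- ===== Notes on version B (the rewrite author's own statement) =====
-- stated objective: simpler
-- what changed: B builds no rank indexes at all: instead of A's three note_id->rank dicts joined by a sorted key-set union, B collects the sorted distinct note_ids once and fills each output row by a reverse linear scan of each source list for the last matching row (last-write-wins by construction).
import Mathlib
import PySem

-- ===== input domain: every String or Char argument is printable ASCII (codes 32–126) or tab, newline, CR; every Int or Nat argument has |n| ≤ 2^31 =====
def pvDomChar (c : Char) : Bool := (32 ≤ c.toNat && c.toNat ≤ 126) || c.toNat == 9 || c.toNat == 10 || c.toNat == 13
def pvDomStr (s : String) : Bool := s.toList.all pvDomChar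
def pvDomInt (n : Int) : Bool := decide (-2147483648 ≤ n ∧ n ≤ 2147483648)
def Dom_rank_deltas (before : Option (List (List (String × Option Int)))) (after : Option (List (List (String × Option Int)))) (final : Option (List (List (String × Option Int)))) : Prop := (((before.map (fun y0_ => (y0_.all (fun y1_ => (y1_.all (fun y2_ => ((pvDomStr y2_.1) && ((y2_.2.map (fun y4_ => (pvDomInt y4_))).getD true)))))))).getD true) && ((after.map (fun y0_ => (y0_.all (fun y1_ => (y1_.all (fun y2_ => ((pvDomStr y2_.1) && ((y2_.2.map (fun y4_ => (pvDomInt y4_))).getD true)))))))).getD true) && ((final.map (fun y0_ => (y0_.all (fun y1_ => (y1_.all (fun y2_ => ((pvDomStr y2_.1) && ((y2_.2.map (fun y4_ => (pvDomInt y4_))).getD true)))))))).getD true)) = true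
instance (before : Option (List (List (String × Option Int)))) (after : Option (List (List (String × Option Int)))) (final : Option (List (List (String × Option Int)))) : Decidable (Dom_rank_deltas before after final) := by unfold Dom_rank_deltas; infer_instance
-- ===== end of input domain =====

-- B drops A's three note_id->rank dicts entirely: it collects the sorted distinct note_ids and
-- fills each output row by a reverse linear scan of each source list for the last matching row.
-- Objective: simpler (no indexes); return-value equivalence only, neither mutates its arguments.

-- row.get(k): a Python dict lookup that yields None both for a missing key and a stored None
def pvRowGet (row : List (String × Option Int)) (k : String) : Option Int :=
  ((PySem.Dict.mk row).get? k).getD none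

-- ===== PORT A =====
-- inner helper 'ranks(rows)' of A
def pvRanks (rows : List (List (String × Option Int))) : PySem.Dict Int (Option Int) :=
  rows.foldl (fun out row =>
      match pvRowGet row "note_id" with
      | some note_id => out.insert note_id (pvRowGet row "rank")
      | none => out)
    PySem.Dict.empty

def rank_deltas (before : Option (List (List (String × Option Int)))) (after : Option (List (List (String × Option Int)))) (final : Option (List (List (String × Option Int)))) : List (List (String × Option Int)) :=
  let before_ranks := pvRanks (before.getD [])
  let after_ranks := pvRanks (after.getD [])
  let final_ranks := pvRanks (final.getD [])
  let note_ids := PySem.List.sorted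
    (PySem.Set.union (PySem.Set.union (PySem.Set.ofList before_ranks.keys) after_ranks.keys) final_ranks.keys)
    (fun x => x) false
  note_ids.map (fun note_id =>
    [("note_id", some note_id),
     ("pre_rank", (before_ranks.get? note_id).getD none),
     ("post_rerank_rank", (after_ranks.get? note_id).getD none),
     ("final_rank", (final_ranks.get? note_id).getD none)])

-- ===== PORT B =====
-- inner helper 'last_rank(rows, note_id)' of B: first hit of a reverse scan, None if no row matches
def pvLastRank (rows : Option (List (List (String × Option Int)))) (id : Int) : Option Int :=
  match (rows.getD []).reverse.find? (fun r => pvRowGet r "note_id" == some id) with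
  | some r => pvRowGet r "rank"
  | none => none

def rank_deltas_alt (before : Option (List (List (String × Option Int)))) (after : Option (List (List (String × Option Int)))) (final : Option (List (List (String × Option Int)))) : List (List (String × Option Int)) :=
  let ids : PySem.Set Int :=
    (before.getD [] ++ after.getD [] ++ final.getD []).foldl
      (fun s row => match pvRowGet row "note_id" with
        | some id => PySem.Set.add s id
        | none => s) PySem.Set.empty
  (PySem.List.sorted ids (fun x => x) false).map (fun i =>
    [("note_id", some i),
     ("pre_rank", pvLastRank before i),
     ("post_rerank_rank", pvLastRank after i),
     ("final_rank", pvLastRank final i)])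

-- ===== PRECONDITION & SPEC =====
def Spec_rank_deltas (before : Option (List (List (String × Option Int)))) (after : Option (List (List (String × Option Int)))) (final : Option (List (List (String × Option Int)))) (out : List (List (String × Option Int))) : Prop := out = rank_deltas_alt before after final
instance (before : Option (List (List (String × Option Int)))) (after : Option (List (List (String × Option Int)))) (final : Option (List (List (String × Option Int)))) (out : List (List (String × Option Int))) : Decidable (Spec_rank_deltas before after final out) := by unfold Spec_rank_deltas; infer_instance

-- ===== CLAIM =====
def Claim_equal_rank_deltas : Prop := ∀ (before : Option (List (List (String × Option Int)))) (after : Option (List (List (String × Option Int)))) (final : Option (List (List (String × Option Int)))), Dom_rank_deltas before after final → Spec_rank_deltas before after final (rank_deltas before after final)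

-- ===== LEMMAS AND PROOFS =====

-- the last row of rows whose note_id reads as id, as a first-match scan of the reverse
def pvLastRow (id : Int) (rows : List (List (String × Option Int))) :
    Option (List (String × Option Int)) :=
  rows.reverse.find? (fun r => pvRowGet r "note_id" == some id)

lemma pvLastRow_cons (id : Int) (r : List (String × Option Int)) (rs : List (List (String × Option Int))) :
    pvLastRow id (r :: rs)
      = (pvLastRow id rs).or (if pvRowGet r "note_id" = some id then some r else none) := by
  simp only [pvLastRow, List.reverse_cons, List.find?_append, List.find?]
  by_cases h : pvRowGet r "note_id" = some id
  · simp [h]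
  · have hb : (pvRowGet r "note_id" == some id) = false := beq_eq_false_iff_ne.mpr h
    simp [h, hb]

lemma pvRanks_fold_get (id : Int) (rows : List (List (String × Option Int))) :
    ∀ (d : PySem.Dict Int (Option Int)),
    (rows.foldl (fun out row =>
        match pvRowGet row "note_id" with
        | some note_id => out.insert note_id (pvRowGet row "rank")
        | none => out) d).get? id
      = match pvLastRow id rows with
        | some r => some (pvRowGet r "rank")
        | none => d.get? id := by
  induction rows with
  | nil => intro d; simp [pvLastRow]
  | cons r rs ih =>
    intro d
    simp only [List.foldl_cons]
    rw [ih, pvLastRow_cons]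
    cases hfind : pvLastRow id rs with
    | some r' => simp
    | none =>
      simp only [Option.none_or]
      cases hn : pvRowGet r "note_id" with
      | none => simp
      | some nid =>
        by_cases hid : nid = id
        · subst hid; simp [PySem.Dict.get?_insert_self]
        · simp [hid, PySem.Dict.get?_insert_of_ne _ _ (fun h => hid h.symm)]

-- A's dict lookup (with .get default None) is exactly B's reverse scan
lemma pvRanks_get_eq_lastRank (rows : Option (List (List (String × Option Int)))) (id : Int) :
    ((pvRanks (rows.getD [])).get? id).getD none = pvLastRank rows id := by
  unfold pvRanks pvLastRank
  rw [pvRanks_fold_get]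
  rw [show (rows.getD []).reverse.find? (fun r => pvRowGet r "note_id" == some id)
        = pvLastRow id (rows.getD []) from rfl]
  cases pvLastRow id (rows.getD []) <;> simp [PySem.Dict.get?_empty]

lemma pvRanks_keys_mem (id : Int) (rows : List (List (String × Option Int))) :
    ∀ (d : PySem.Dict Int (Option Int)),
    (id ∈ (rows.foldl (fun out row =>
        match pvRowGet row "note_id" with
        | some note_id => out.insert note_id (pvRowGet row "rank")
        | none => out) d).keys)
      ↔ id ∈ d.keys ∨ ∃ r ∈ rows, pvRowGet r "note_id" = some id := by
  induction rows with
  | nil => intro d; simp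
  | cons r rs ih =>
    intro d
    simp only [List.foldl_cons]
    rw [ih]
    cases hn : pvRowGet r "note_id" with
    | none => simp [hn]
    | some nid =>
      simp only [List.mem_cons]
      constructor
      · rintro (h | h)
        · rw [PySem.Dict.mem_keys_insert] at h
          rcases h with h | h
          · exact Or.inr ⟨r, Or.inl rfl, by rw [hn, h]⟩
          · exact Or.inl h
        · rcases h with ⟨r', hr', h⟩; exact Or.inr ⟨r', Or.inr hr', h⟩
      · rintro (h | ⟨r', hr' | hr', h⟩)
        · exact Or.inl (by rw [PySem.Dict.mem_keys_insert]; exact Or.inr h)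
        · subst hr'; rw [hn] at h; injection h with h
          exact Or.inl (by rw [PySem.Dict.mem_keys_insert]; exact Or.inl h.symm)
        · exact Or.inr ⟨r', hr', h⟩

-- B's id-set fold: membership and nodup
lemma pvIds_mem (id : Int) (rows : List (List (String × Option Int))) :
    ∀ (s : PySem.Set Int),
    (id ∈ rows.foldl (fun s row => match pvRowGet row "note_id" with
        | some i => PySem.Set.add s i
        | none => s) s)
      ↔ id ∈ s ∨ ∃ r ∈ rows, pvRowGet r "note_id" = some id := by
  induction rows with
  | nil => intro s; simp
  | cons r rs ih =>
    intro s
    simp only [List.foldl_cons]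
    rw [ih]
    cases hn : pvRowGet r "note_id" with
    | none => simp [hn]
    | some nid =>
      rw [PySem.Set.mem_add]
      constructor
      · rintro ((h | h) | h)
        · exact Or.inl h
        · exact Or.inr ⟨r, List.mem_cons_self, by rw [hn, h]⟩
        · rcases h with ⟨r', hr', h⟩; exact Or.inr ⟨r', List.mem_cons_of_mem _ hr', h⟩
      · rintro (h | ⟨r', hr', h⟩)
        · exact Or.inl (Or.inl h)
        · rcases List.mem_cons.mp hr' with hr' | hr'
          · subst hr'; rw [hn] at h; injection h with h
            exact Or.inl (Or.inr h.symm)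
          · exact Or.inr ⟨r', hr', h⟩

lemma pvIds_nodup (rows : List (List (String × Option Int))) :
    ∀ (s : PySem.Set Int), s.Nodup →
    (rows.foldl (fun s row => match pvRowGet row "note_id" with
        | some i => PySem.Set.add s i
        | none => s) s).Nodup := by
  induction rows with
  | nil => intro s h; simpa using h
  | cons r rs ih =>
    intro s h
    simp only [List.foldl_cons]
    cases hn : pvRowGet r "note_id" with
    | none => exact ih s h
    | some nid => exact ih _ (PySem.Set.nodup_add _ _ h)

-- A's sorted key-set union is a permutation of B's id set
lemma pv_keys_perm (b a f : List (List (String × Option Int))) :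
    (PySem.Set.union (PySem.Set.union (PySem.Set.ofList (pvRanks b).keys) (pvRanks a).keys) (pvRanks f).keys).Perm
      ((b ++ a ++ f).foldl (fun s row => match pvRowGet row "note_id" with
        | some i => PySem.Set.add s i
        | none => s) PySem.Set.empty) := by
  rw [List.perm_ext_iff_of_nodup]
  · intro id
    rw [PySem.Set.mem_union, PySem.Set.mem_union, PySem.Set.mem_ofList, pvIds_mem]
    unfold pvRanks
    rw [pvRanks_keys_mem, pvRanks_keys_mem, pvRanks_keys_mem]
    simp only [PySem.Dict.keys_empty]
    constructor
    · rintro ((h | h) | h) <;>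
        [skip; skip; skip] <;>
        first
        | (rcases h with h | ⟨r, hr, hid⟩; · simp at h
           exact Or.inr ⟨r, by simp [hr], hid⟩)
    · rintro (h | ⟨r, hr, hid⟩)
      · simp [PySem.Set.empty] at h
      · rcases List.mem_append.mp hr with hr | hr
        · rcases List.mem_append.mp hr with hr | hr
          · exact Or.inl (Or.inl (Or.inr ⟨r, hr, hid⟩))
          · exact Or.inl (Or.inr (Or.inr ⟨r, hr, hid⟩))
        · exact Or.inr (Or.inr ⟨r, hr, hid⟩)
  · exact PySem.Set.nodup_union _ _ (PySem.Set.nodup_union _ _ (PySem.Set.nodup_ofList _))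
  · exact pvIds_nodup _ _ (by simp [PySem.Set.empty])

-- ===== VERDICT =====
theorem rank_deltas_spec : Claim_equal_rank_deltas := by
  intro before after final _
  show rank_deltas before after final = rank_deltas_alt before after final
  simp only [rank_deltas, rank_deltas_alt]
  rw [(PySem.List.sorted_id_eq_sorted_id_iff_perm _ _).mpr
        (pv_keys_perm (before.getD []) (after.getD []) (final.getD []))]
  apply List.map_congr_left
  intro id _
  rw [pvRanks_get_eq_lastRank, pvRanks_get_eq_lastRank, pvRanks_get_eq_lastRank]
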